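-- pv_equiv track=rewrite | github.com/Leapense/problems | 28951번： Эскалатор/Эскалатор.py | sum_digits_multiples
-- ===== SOURCE A (Python) =====
-- def sum_digits_multiples(m):
--     total = 0
--     d = 1
--     start = 1
--     while start <= m:
--         end = min(m, 10**d - 1)
--         count = end - start + 1
--         total += count * (d + 1)
--         d += 1
--         start *= 10
--     return total
-- ===== SOURCE B (Python) =====
-- def sum_digits_multiples(m):
--     if m < 1:
--         return 0
--     d = 1
--     while 10 ** d <= m:
--         d += 1
--     return (d + 1) * m + d - (10 ** d - 1) // 9
-- ===== Notes on version B (the rewrite author's own statement) =====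
-- stated objective: alternative
-- what changed: Replaces the per-bucket accumulation loop (count*(d+1) added for every digit-length bucket) with a loop that only finds the digit count d of m and then a single closed-form formula (d+1)*m + d - (10**d - 1)//9.
import Mathlib
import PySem

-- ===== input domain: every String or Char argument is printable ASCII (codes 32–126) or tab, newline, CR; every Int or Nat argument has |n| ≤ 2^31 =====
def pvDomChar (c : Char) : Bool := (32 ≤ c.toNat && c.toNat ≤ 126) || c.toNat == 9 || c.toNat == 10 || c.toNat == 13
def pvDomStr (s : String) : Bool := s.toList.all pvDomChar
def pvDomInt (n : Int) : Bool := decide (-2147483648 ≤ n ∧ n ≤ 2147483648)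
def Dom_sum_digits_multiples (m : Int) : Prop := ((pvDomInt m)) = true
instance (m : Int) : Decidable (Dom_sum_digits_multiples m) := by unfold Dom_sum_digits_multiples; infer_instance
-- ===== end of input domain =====

-- B replaces A's per-bucket accumulation with a digit-count loop plus a closed-form formula (alternative algorithm, same cost).

-- ===== PORT A =====
-- A's while loop; the '1 ≤ start' conjunct is a totality guard only (start is 1 and
-- only ever multiplied by 10, so it always holds on reachable states).
def pvLoopA (m total d start : Int) : Int :=
  if h : 1 ≤ start ∧ start ≤ m then
    pvLoopA m (total + (min m ((10:Int) ^ d.toNat - 1) - start + 1) * (d + 1)) (d + 1) (start * 10)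
  else total
termination_by (m + 1 - start).toNat
decreasing_by omega

def sum_digits_multiples (m : Int) : Int := pvLoopA m 0 1 1

-- ===== PORT B =====
-- B's 'while 10 ** d <= m: d += 1' loop.
def pvLoopB (m d : Int) : Int :=
  if h : (10:Int) ^ d.toNat ≤ m then pvLoopB m (d + 1) else d
termination_by (m - d).toNat
decreasing_by
  have h1 : (d.toNat : Int) < (10:Int) ^ d.toNat := by
    have : d.toNat < 10 ^ d.toNat := Nat.lt_pow_self (by norm_num)
    exact_mod_cast this
  have h2 : d ≤ (d.toNat : Int) := Int.self_le_toNat d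
  omega

def sum_digits_multiples_alt (m : Int) : Int :=
  if m < 1 then 0
  else
    let d := pvLoopB m 1
    (d + 1) * m + d - PySem.Int.floordiv ((10:Int) ^ d.toNat - 1) 9

-- ===== PRECONDITION & SPEC =====
def Spec_sum_digits_multiples (m : Int) (out : Int) : Prop := out = sum_digits_multiples_alt m
instance (m : Int) (out : Int) : Decidable (Spec_sum_digits_multiples m out) := by unfold Spec_sum_digits_multiples; infer_instance

-- ===== CLAIM (what is proved, stated in full; the proofs are below) =====
def Claim_equal_sum_digits_multiples : Prop := ∀ (m : Int), Dom_sum_digits_multiples m → Spec_sum_digits_multiples m (sum_digits_multiples m)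

-- ===== LEMMAS AND PROOFS =====

-- Repunit R d with 9 * R d = 10^d - 1.
def pvR : Nat → Int
  | 0 => 0
  | d + 1 => 10 * pvR d + 1

lemma pvR_mul : ∀ d : Nat, 9 * pvR d = (10:Int) ^ d - 1 := by
  intro d
  induction d with
  | zero => simp [pvR]
  | succ n ih => simp only [pvR, pow_succ]; ring_nf; ring_nf at ih; omega

-- Closed form F d m = (d+1)*m + d - R d.
def pvF (d : Nat) (m : Int) : Int := ((d : Int) + 1) * m + d - pvR d

-- Main loop lemma: one full run of A's loop from start = 10^e, digit width e+1,
-- when m has exactly e+k+1 digits.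
lemma pvLoopA_eq : ∀ (k e : Nat) (total m : Int),
    (10:Int) ^ (e + k) ≤ m → m < (10:Int) ^ (e + k + 1) →
    pvLoopA m total ((e : Int) + 1) ((10:Int) ^ e) = total + pvF (e + k + 1) m - pvF e ((10:Int) ^ e - 1) := by
  intro k
  induction k with
  | zero =>
    intro e total m hlo hhi
    simp only [Nat.add_zero] at hlo hhi
    have hpos : (0:Int) < (10:Int) ^ e := by positivity
    rw [pvLoopA]
    have hcond : 1 ≤ (10:Int) ^ e ∧ (10:Int) ^ e ≤ m := ⟨hpos, hlo⟩
    rw [dif_pos hcond]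
    have htn : (((e:Int) + 1).toNat) = e + 1 := by omega
    rw [htn]
    have hmin : min m ((10:Int) ^ (e + 1) - 1) = m := by omega
    rw [hmin]
    rw [pvLoopA]
    have hno : ¬ (1 ≤ (10:Int) ^ e * 10 ∧ (10:Int) ^ e * 10 ≤ m) := by
      rw [pow_succ] at hhi; omega
    rw [dif_neg hno]
    have h9 := pvR_mul e
    have h9' := pvR_mul (e + 1)
    simp only [pvF, pvR, pow_succ] at *
    push_cast
    ring_nf
    ring_nf at h9 h9'
    omega
  | succ k ih =>
    intro e total m hlo hhi
    have hpos : (0:Int) < (10:Int) ^ e := by positivity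
    have hle : (10:Int) ^ e ≤ (10:Int) ^ (e + (k+1)) := by
      exact pow_le_pow_right₀ (by norm_num) (by omega)
    rw [pvLoopA]
    have hcond : 1 ≤ (10:Int) ^ e ∧ (10:Int) ^ e ≤ m := ⟨hpos, le_trans hle hlo⟩
    rw [dif_pos hcond]
    have htn : (((e:Int) + 1).toNat) = e + 1 := by omega
    rw [htn]
    have hle1 : (10:Int) ^ (e + 1) ≤ (10:Int) ^ (e + (k+1)) := by
      exact pow_le_pow_right₀ (by norm_num) (by omega)
    have hmin : min m ((10:Int) ^ (e + 1) - 1) = (10:Int) ^ (e + 1) - 1 := by omega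
    rw [hmin]
    have hstep : (10:Int) ^ e * 10 = (10:Int) ^ (e + 1) := by rw [pow_succ]
    have hcast : (e : Int) + 1 + 1 = ((e + 1 : Nat) : Int) + 1 := by push_cast; ring
    rw [hstep, hcast]
    have hlo' : (10:Int) ^ (e + 1 + k) ≤ m := by
      have : e + 1 + k = e + (k + 1) := by omega
      rw [this]; exact hlo
    have hhi' : m < (10:Int) ^ (e + 1 + k + 1) := by
      have : e + 1 + k + 1 = e + (k + 1) + 1 := by omega
      rw [this]; exact hhi
    rw [ih (e + 1) _ m hlo' hhi']
    have h9 := pvR_mul e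
    have h9' := pvR_mul (e + 1)
    have harr : e + 1 + k + 1 = e + (k + 1) + 1 := by omega
    rw [harr]
    simp only [pvF, pvR, pow_succ] at *
    push_cast
    ring_nf
    ring_nf at h9 h9'
    omega

-- B's digit-count loop returns k+1 when 10^k ≤ m < 10^(k+1).
lemma pvLoopB_eq : ∀ (j k : Nat) (m : Int), j ≤ k →
    (10:Int) ^ k ≤ m → m < (10:Int) ^ (k + 1) →
    pvLoopB m ((k : Int) - j + 1) = (k : Int) + 1 := by
  intro j
  induction j with
  | zero =>
    intro k m _ hlo hhi
    rw [pvLoopB]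
    simp only [Nat.cast_zero]
    have htn : (((k:Int) - 0 + 1).toNat) = k + 1 := by omega
    rw [htn, dif_neg (by omega)]
    ring
  | succ j ih =>
    intro k m hjk hlo hhi
    rw [pvLoopB]
    simp only [Nat.cast_add, Nat.cast_one]
    have htn : (((k:Int) - ((j:Int)+1) + 1).toNat) = k - j := by omega
    have hle : (10:Int) ^ (k - j) ≤ (10:Int) ^ k :=
      pow_le_pow_right₀ (by norm_num) (by omega)
    rw [htn, dif_pos (le_trans hle hlo)]
    have : (k:Int) - (j+1) + 1 + 1 = (k:Int) - j + 1 := by ring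
    rw [this]
    exact ih k m (by omega) hlo hhi

lemma pvFloordiv_R (d : Nat) : PySem.Int.floordiv ((10:Int) ^ d - 1) 9 = pvR d := by
  have h9 := pvR_mul d
  rw [← h9]
  rw [mul_comm]
  simp [PySem.Int.floordiv, Int.mul_fdiv_cancel _ (by norm_num : (9:Int) ≠ 0)]

-- ===== VERDICT (by name: the statement is the Claim_ definition above) =====
theorem sum_digits_multiples_spec : Claim_equal_sum_digits_multiples := by
  intro m _
  unfold Spec_sum_digits_multiples sum_digits_multiples sum_digits_multiples_alt
  by_cases hm : m < 1
  · rw [if_pos hm, pvLoopA, dif_neg (by omega)]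
  · rw [if_neg hm]
    push Not at hm
    -- digit count: k with 10^k ≤ m < 10^(k+1)
    obtain ⟨k, hlo, hhi⟩ : ∃ k : Nat, (10:Int) ^ k ≤ m ∧ m < (10:Int) ^ (k + 1) := by
      refine ⟨Nat.log 10 m.toNat, ?_, ?_⟩
      · have := Nat.pow_log_le_self 10 (x := m.toNat) (by omega)
        have h2 : ((10:Nat) ^ Nat.log 10 m.toNat : Int) ≤ (m.toNat : Int) := by exact_mod_cast this
        push_cast at h2; omega
      · have := Nat.lt_pow_succ_log_self (by norm_num : 1 < 10) m.toNat
        have h2 : ((m.toNat : Nat) : Int) < ((10:Nat) ^ (Nat.log 10 m.toNat + 1) : Int) := by exact_mod_cast this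
        push_cast at h2; omega
    have hB : pvLoopB m 1 = (k : Int) + 1 := by
      have := pvLoopB_eq k k m (le_refl k) hlo hhi
      simpa using this
    have hA : pvLoopA m 0 1 1 = 0 + pvF (0 + k + 1) m - pvF 0 ((10:Int) ^ 0 - 1) := by
      have := pvLoopA_eq k 0 0 m (by simpa using hlo) (by simpa using hhi)
      simpa using this
    simp only [hB, hA]
    have htn : (((k:Int) + 1).toNat) = k + 1 := by omega
    rw [htn, pvFloordiv_R]
    have hz : pvF 0 ((10:Int) ^ 0 - 1) = 0 := by simp [pvF, pvR]
    have ha : (0:Nat) + k + 1 = k + 1 := by omega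
    rw [hz, ha]
    simp only [pvF]
    push_cast
    ring
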